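-- pv_equiv track=rewrite | github.com/UNIT-Electronics-MX/unit_devlab_capacitive_touch_sensor | software/scripts/smart-extract-docs.py | extract_content_without_main_title
-- ===== SOURCE A (Python) =====
-- def extract_content_without_main_title(content):
--     """Extract content without the main title to avoid duplication."""
--     lines = content.split('\n')
--     filtered_lines = []
--     skip_next_empty = False
--     title_found = False
--
--     for i, line in enumerate(lines):
--         # Skip main title (first # header)
--         if not title_found and line.strip().startswith('#') and not line.strip().startswith('##'):
--             title_found = True
--             skip_next_empty = True
--             continue
--
--         # Skip empty line after title
--         if skip_next_empty and line.strip() == '':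
--             skip_next_empty = False
--             continue
--
--         filtered_lines.append(line)
--
--     return '\n'.join(filtered_lines)
-- ===== SOURCE B (Python) =====
-- def extract_content_without_main_title(content):
--     """Extract content without the main title to avoid duplication."""
--     lines = content.split('\n')
--     idx = next((i for i, line in enumerate(lines)
--                 if line.strip().startswith('#') and not line.strip().startswith('##')),
--                None)
--     if idx is None:
--         return '\n'.join(lines)
--     rest = lines[idx + 1:]
--     for j, line in enumerate(rest):
--         if line.strip() == '':
--             del rest[j]
--             break
--     return '\n'.join(lines[:idx] + rest)
-- ===== Notes on version B (the rewrite author's own statement) =====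
-- stated objective: alternative
-- what changed: Replaces A's single-pass two-flag (title_found/skip_next_empty) state machine with a locate-then-splice approach: find the index of the first top-level header, then rebuild from the prefix plus the suffix with its first blank line removed.
import Mathlib
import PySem

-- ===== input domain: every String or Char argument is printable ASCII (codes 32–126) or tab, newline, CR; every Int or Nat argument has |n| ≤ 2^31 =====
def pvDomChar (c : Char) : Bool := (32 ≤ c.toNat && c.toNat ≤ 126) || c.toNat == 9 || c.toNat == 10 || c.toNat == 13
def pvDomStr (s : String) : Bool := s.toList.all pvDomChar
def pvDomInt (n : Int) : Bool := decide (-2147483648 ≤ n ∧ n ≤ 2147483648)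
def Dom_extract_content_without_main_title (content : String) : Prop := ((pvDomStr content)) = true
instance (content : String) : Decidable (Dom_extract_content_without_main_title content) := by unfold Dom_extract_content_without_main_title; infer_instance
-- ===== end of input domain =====

-- B replaces A's single-pass two-flag state machine by locate-the-title-then-splice (alternative decomposition; same cost).

-- ===== PORT A =====
-- the for-loop of A: state = (title_found, skip_next_empty), emitting kept lines in order
def pvALoop : List String → Bool → Bool → List String
  | [], _, _ => []
  | line :: rest, titleFound, skipNextEmpty =>
    if !titleFound && PySem.Str.startswith (PySem.Str.strip line) "#"
        && !(PySem.Str.startswith (PySem.Str.strip line) "##") then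
      pvALoop rest true true
    else if skipNextEmpty && (PySem.Str.strip line == "") then
      pvALoop rest titleFound false
    else
      line :: pvALoop rest titleFound skipNextEmpty

def extract_content_without_main_title (content : String) : String :=
  PySem.Str.join "\n" (pvALoop ((PySem.Str.split? content "\n").getD []) false false)

-- ===== PORT B =====
def pvIsTitle (line : String) : Bool :=
  PySem.Str.startswith (PySem.Str.strip line) "#"
    && !(PySem.Str.startswith (PySem.Str.strip line) "##")

-- the 'del rest[j]; break' loop of B: drop the first blank line of the suffix
def pvDropFirstBlank : List String → List String
  | [] => []
  | line :: rest =>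
    if PySem.Str.strip line == "" then rest else line :: pvDropFirstBlank rest

def extract_content_without_main_title_alt (content : String) : String :=
  let lines := (PySem.Str.split? content "\n").getD []
  match lines.findIdx? pvIsTitle with
  | none => PySem.Str.join "\n" lines
  | some idx =>
      PySem.Str.join "\n" (lines.take idx ++ pvDropFirstBlank (lines.drop (idx + 1)))

-- ===== PRECONDITION & SPEC =====
def Spec_extract_content_without_main_title (content : String) (out : String) : Prop := out = extract_content_without_main_title_alt content
instance (content : String) (out : String) : Decidable (Spec_extract_content_without_main_title content out) := by unfold Spec_extract_content_without_main_title; infer_instance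

-- ===== CLAIM (what is proved, stated in full; the proofs are below) =====
def Claim_equal_extract_content_without_main_title : Prop := ∀ (content : String), Dom_extract_content_without_main_title content → Spec_extract_content_without_main_title content (extract_content_without_main_title content)

-- ===== LEMMAS AND PROOFS =====

-- once the title is found and the blank was already skipped, A keeps every line
theorem pvALoop_true_false (l : List String) : pvALoop l true false = l := by
  induction l with
  | nil => rfl
  | cons x xs ih => simp [pvALoop, ih]

-- once the title is found, A's remaining pass drops exactly the first blank line
theorem pvALoop_true_true (l : List String) : pvALoop l true true = pvDropFirstBlank l := by
  induction l with
  | nil => rfl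
  | cons x xs ih =>
    by_cases h : PySem.Str.strip x == ""
    · simp [pvALoop, pvDropFirstBlank, h, pvALoop_true_false]
    · simp [pvALoop, pvDropFirstBlank, h, ih]

-- no title anywhere: A keeps every line
theorem pvALoop_no_title (l : List String) (h : l.findIdx? pvIsTitle = none) :
    pvALoop l false false = l := by
  induction l with
  | nil => rfl
  | cons x xs ih =>
    rw [List.findIdx?_cons] at h
    by_cases hx : pvIsTitle x = true
    · simp [hx] at h
    · have hxs : xs.findIdx? pvIsTitle = none := by
        simp [hx] at h; simpa using h
      simp only [pvALoop, Bool.not_false, Bool.true_and]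
      rw [if_neg, if_neg]
      · rw [ih hxs]
      · simp
      · intro hc
        apply hx
        simpa [pvIsTitle] using hc

-- title at index idx: A's result is B's splice
theorem pvALoop_title (l : List String) (idx : Nat) (h : l.findIdx? pvIsTitle = some idx) :
    pvALoop l false false = l.take idx ++ pvDropFirstBlank (l.drop (idx + 1)) := by
  induction l generalizing idx with
  | nil => simp at h
  | cons x xs ih =>
    rw [List.findIdx?_cons] at h
    by_cases hx : pvIsTitle x = true
    · simp [hx] at h
      subst h
      simp only [pvALoop, Bool.not_false, Bool.true_and]
      rw [if_pos]
      · simpa using pvALoop_true_true xs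
      · simpa [pvIsTitle] using hx
    · simp only [hx, Bool.false_eq_true, if_false] at h
      rcases Option.map_eq_some_iff.mp h with ⟨j, hj, rfl⟩
      simp only [pvALoop, Bool.not_false, Bool.true_and]
      rw [if_neg, if_neg]
      · rw [ih j hj]
        simp [List.take_succ_cons, List.drop_succ_cons]
      · simp
      · intro hc
        apply hx
        simpa [pvIsTitle] using hc

-- ===== VERDICT (by name: the statement is the Claim_ definition above) =====
theorem extract_content_without_main_title_spec : Claim_equal_extract_content_without_main_title := by
  intro content _
  unfold Spec_extract_content_without_main_title
  unfold extract_content_without_main_title extract_content_without_main_title_alt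
  cases h : ((PySem.Str.split? content "\n").getD []).findIdx? pvIsTitle with
  | none => rw [pvALoop_no_title _ h]; simp only [h]
  | some idx => rw [pvALoop_title _ idx h]; simp only [h]
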